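-- pv_equiv track=rewrite | github.com/z80rotom/pokeemerald | pytools/tmhm_learnsets_json/tmhm_learnsets.py | convert_sections
-- ===== SOURCE A (Python) =====
-- SCAN_DEFINE = "#define"
--
-- SCAN_COMMENT = "//"
--
-- SCAN_EVOS = "const u32 gTMHMLearnsets[][2] ="
--
-- SCAN_ARRAY_START = "{"
--
-- SCAN_ARRAY_END = "};"
--
-- def convert_sections(in_lines):
--     out_lines = []
--
--     lines = []
--     in_evos = False
--     in_array = False
--     for line in in_lines:
--         line = line.strip()
--         if line.startswith(SCAN_DEFINE):
--             continue
--         if line.startswith(SCAN_COMMENT):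
--             continue
--         if line.startswith(SCAN_EVOS):
--             in_evos = True
--             continue
--
--         # Need to double check we're not in array so we don't mistake
--         # an evolution entry as an outer array scan token
--         if in_evos and not in_array and line.startswith(SCAN_ARRAY_START):
--             in_array = True
--             continue
--
--         if not in_array:
--             continue
--
--         if line.startswith(SCAN_ARRAY_END):
--             in_array = False
--             in_evos = False
--             break
--         lines.append(line)
--     return '\n'.join(lines)
-- ===== SOURCE B (Python) =====
-- SCAN_DEFINE = "#define"
-- SCAN_COMMENT = "//"
-- SCAN_EVOS = "const u32 gTMHMLearnsets[][2] ="
-- SCAN_ARRAY_START = "{"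
-- SCAN_ARRAY_END = "};"
--
--
-- def _after_first(lines, prefix):
--     """Suffix of `lines` after the first line starting with `prefix`, or None."""
--     for i, l in enumerate(lines):
--         if l.startswith(prefix):
--             return lines[i + 1:]
--     return None
--
--
-- def convert_sections(in_lines):
--     s = [l.strip() for l in in_lines]
--     rest = _after_first(s, SCAN_EVOS)
--     if rest is None:
--         return ''
--     rest = _after_first(rest, SCAN_ARRAY_START)
--     if rest is None:
--         return ''
--     body = []
--     for l in rest:
--         if l.startswith(SCAN_ARRAY_END):
--             break
--         if not (l.startswith(SCAN_DEFINE) or l.startswith(SCAN_COMMENT)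
--                 or l.startswith(SCAN_EVOS)):
--             body.append(l)
--     return '\n'.join(body)
-- ===== Notes on version B (the rewrite author's own statement) =====
-- stated objective: simpler
-- what changed: Replaced A's single pass with two boolean flags (in_evos/in_array) by a locate-then-filter decomposition: find the suffix after the header line, find the suffix after the array-opening '{', then collect body lines up to '};' dropping #define/comment/header lines; outside the body each line is tested against one prefix instead of A's full flag cascade.
import Mathlib
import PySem

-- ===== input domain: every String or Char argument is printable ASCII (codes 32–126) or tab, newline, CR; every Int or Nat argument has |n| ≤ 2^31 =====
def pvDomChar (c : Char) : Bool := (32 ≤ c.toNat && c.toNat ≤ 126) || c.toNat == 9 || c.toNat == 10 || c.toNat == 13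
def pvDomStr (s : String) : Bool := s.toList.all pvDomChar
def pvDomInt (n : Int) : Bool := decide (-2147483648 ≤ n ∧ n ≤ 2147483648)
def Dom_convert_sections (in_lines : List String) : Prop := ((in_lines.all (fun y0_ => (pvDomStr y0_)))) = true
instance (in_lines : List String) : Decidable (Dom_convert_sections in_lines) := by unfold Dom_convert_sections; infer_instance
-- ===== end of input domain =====

-- B replaces A's two-flag single-pass state machine by a locate-boundaries-then-filter decomposition (simpler; same cost).

def SCAN_DEFINE : String := "#define"
def SCAN_COMMENT : String := "//"
def SCAN_EVOS : String := "const u32 gTMHMLearnsets[][2] ="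
def SCAN_ARRAY_START : String := "{"
def SCAN_ARRAY_END : String := "};"

-- ===== PORT A =====
-- A's single loop over the lines with flags in_evos / in_array and accumulator `lines`.
def loopA : List String → Bool → Bool → List String → List String
  | [], _, _, lines => lines
  | l :: rest, in_evos, in_array, lines =>
    let line := PySem.Str.strip l
    if PySem.Str.startswith line SCAN_DEFINE then loopA rest in_evos in_array lines
    else if PySem.Str.startswith line SCAN_COMMENT then loopA rest in_evos in_array lines
    else if PySem.Str.startswith line SCAN_EVOS then loopA rest true in_array lines
    else if in_evos && !in_array && PySem.Str.startswith line SCAN_ARRAY_START then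
      loopA rest in_evos true lines
    else if !in_array then loopA rest in_evos in_array lines
    else if PySem.Str.startswith line SCAN_ARRAY_END then lines
    else loopA rest in_evos in_array (lines ++ [line])

def convert_sections (in_lines : List String) : String :=
  PySem.Str.join "\n" (loopA in_lines false false [])

-- ===== PORT B =====
-- suffix after the first line starting with `prefix`, or none
def afterFirst : List String → String → Option (List String)
  | [], _ => none
  | l :: rest, pfx =>
    if PySem.Str.startswith l pfx then some rest else afterFirst rest pfx

-- body lines up to '};', dropping #define / comment / header lines
def collectBody : List String → List String
  | [] => []
  | l :: rest =>
    if PySem.Str.startswith l SCAN_ARRAY_END then []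
    else if PySem.Str.startswith l SCAN_DEFINE || PySem.Str.startswith l SCAN_COMMENT
            || PySem.Str.startswith l SCAN_EVOS then collectBody rest
    else l :: collectBody rest

def convert_sections_alt (in_lines : List String) : String :=
  let s := in_lines.map PySem.Str.strip
  match afterFirst s SCAN_EVOS with
  | none => ""
  | some r =>
    match afterFirst r SCAN_ARRAY_START with
    | none => ""
    | some r2 => PySem.Str.join "\n" (collectBody r2)

-- ===== PRECONDITION & SPEC =====
def Spec_convert_sections (in_lines : List String) (out : String) : Prop := out = convert_sections_alt in_lines
instance (in_lines : List String) (out : String) : Decidable (Spec_convert_sections in_lines out) := by unfold Spec_convert_sections; infer_instance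

-- ===== CLAIM (what is proved, stated in full; the proofs are below) =====
def Claim_equal_convert_sections : Prop := ∀ (in_lines : List String), Dom_convert_sections in_lines → Spec_convert_sections in_lines (convert_sections in_lines)

-- ===== LEMMAS AND PROOFS =====

-- A's loop on already-stripped lines (proof helper)
def loopA2 : List String → Bool → Bool → List String → List String
  | [], _, _, lines => lines
  | l :: rest, in_evos, in_array, lines =>
    if PySem.Str.startswith l SCAN_DEFINE then loopA2 rest in_evos in_array lines
    else if PySem.Str.startswith l SCAN_COMMENT then loopA2 rest in_evos in_array lines
    else if PySem.Str.startswith l SCAN_EVOS then loopA2 rest true in_array lines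
    else if in_evos && !in_array && PySem.Str.startswith l SCAN_ARRAY_START then
      loopA2 rest in_evos true lines
    else if !in_array then loopA2 rest in_evos in_array lines
    else if PySem.Str.startswith l SCAN_ARRAY_END then lines
    else loopA2 rest in_evos in_array (lines ++ [l])

lemma loopA_eq_loopA2 (ls : List String) : ∀ e a acc,
    loopA ls e a acc = loopA2 (ls.map PySem.Str.strip) e a acc := by
  induction ls with
  | nil => intro e a acc; rfl
  | cons l rest ih =>
    intro e a acc
    simp only [loopA, loopA2, List.map]
    split_ifs <;> first | rfl | apply ih

-- two nonempty prefixes of the same list share their first character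
lemma pfx_disj {l : List Char} {a b : Char} {p q : List Char}
    (hab : a ≠ b) (hp : (a :: p) <+: l) : ¬ (b :: q) <+: l := by
  intro hq
  match l with
  | [] => exact absurd hp (by simp)
  | c :: t =>
    rw [List.cons_prefix_cons] at hp hq
    exact hab (hp.1.trans hq.1.symm)

lemma sw_disj (l p q : List Char)
    (hne : p.head? ≠ q.head? ∧ p ≠ [] ∧ q ≠ [])
    (hp : PySem.Chars.startswith l p = true) : PySem.Chars.startswith l q = false := by
  obtain ⟨hh, hpne, hqne⟩ := hne
  rw [PySem.Chars.startswith_iff] at hp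
  rw [Bool.eq_false_iff, Ne, PySem.Chars.startswith_iff]
  cases p with
  | nil => exact absurd rfl hpne
  | cons a pt =>
    cases q with
    | nil => exact absurd rfl hqne
    | cons b qt => exact pfx_disj (by simpa using hh) hp

-- phase 1: before the header, every line is skipped
lemma phase1 (ls : List String) : ∀ acc,
    loopA2 ls false false acc =
      match afterFirst ls SCAN_EVOS with
      | none => acc
      | some r => loopA2 r true false acc := by
  induction ls with
  | nil => intro acc; rfl
  | cons l rest ih =>
    intro acc
    by_cases h3 : PySem.Chars.startswith l.toList SCAN_EVOS.toList = true
    · have h1 := sw_disj l.toList SCAN_EVOS.toList SCAN_DEFINE.toList (by decide) h3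
      have h2 := sw_disj l.toList SCAN_EVOS.toList SCAN_COMMENT.toList (by decide) h3
      simp [loopA2, afterFirst, h1, h2, h3]
    · simp only [loopA2, afterFirst, PySem.Str.startswith_eq, h3, Bool.false_and]
      split_ifs <;> simp_all

-- phase 2: after the header, scanning for the opening '{'
lemma phase2 (ls : List String) : ∀ acc,
    loopA2 ls true false acc =
      match afterFirst ls SCAN_ARRAY_START with
      | none => acc
      | some r => loopA2 r true true acc := by
  induction ls with
  | nil => intro acc; rfl
  | cons l rest ih =>
    intro acc
    by_cases h4 : PySem.Chars.startswith l.toList SCAN_ARRAY_START.toList = true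
    · have h1 := sw_disj l.toList SCAN_ARRAY_START.toList SCAN_DEFINE.toList (by decide) h4
      have h2 := sw_disj l.toList SCAN_ARRAY_START.toList SCAN_COMMENT.toList (by decide) h4
      have h3 := sw_disj l.toList SCAN_ARRAY_START.toList SCAN_EVOS.toList (by decide) h4
      simp [loopA2, afterFirst, h1, h2, h3, h4]
    · simp only [loopA2, afterFirst, PySem.Str.startswith_eq, h4]
      split_ifs <;> simp_all

-- phase 3: inside the array, collecting body lines up to '};'
lemma phase3 (ls : List String) : ∀ acc,
    loopA2 ls true true acc = acc ++ collectBody ls := by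
  induction ls with
  | nil => intro acc; simp [loopA2, collectBody]
  | cons l rest ih =>
    intro acc
    by_cases h5 : PySem.Chars.startswith l.toList SCAN_ARRAY_END.toList = true
    · have h1 := sw_disj l.toList SCAN_ARRAY_END.toList SCAN_DEFINE.toList (by decide) h5
      have h2 := sw_disj l.toList SCAN_ARRAY_END.toList SCAN_COMMENT.toList (by decide) h5
      have h3 := sw_disj l.toList SCAN_ARRAY_END.toList SCAN_EVOS.toList (by decide) h5
      simp [loopA2, collectBody, h1, h2, h3, h5]
    · simp only [loopA2, collectBody, PySem.Str.startswith_eq, h5]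
      split_ifs <;> simp_all

-- ===== VERDICT (by name: the statement is the Claim_ definition above) =====
theorem convert_sections_spec : Claim_equal_convert_sections := by
  intro in_lines _
  unfold Spec_convert_sections convert_sections convert_sections_alt
  rw [loopA_eq_loopA2, phase1]
  cases h1 : afterFirst (in_lines.map PySem.Str.strip) SCAN_EVOS with
  | none => simp only [h1]; decide
  | some r =>
    simp only [h1, phase2]
    cases h2 : afterFirst r SCAN_ARRAY_START with
    | none => decide
    | some r2 => simp only [phase3, List.nil_append]
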